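-- pv_equiv track=rewrite | github.com/acnash/SoftMachine | SCRIPTS/gen_structure.py | calculate_peptide_charge
-- ===== SOURCE A (Python) =====
-- def calculate_peptide_charge(sequenceStr: str):
--     sequenceChargeInt: int = 0
--     for aa in sequenceStr:
--         if aa == "R" or aa == "K":
--             sequenceChargeInt = sequenceChargeInt + 1
--         elif aa == "D" or aa == "E":
--             sequenceChargeInt = sequenceChargeInt - 1
--     return sequenceChargeInt
-- ===== SOURCE B (Python) =====
-- def calculate_peptide_charge(sequenceStr: str):
--     return (sequenceStr.count("R") + sequenceStr.count("K")
--             - sequenceStr.count("D") - sequenceStr.count("E"))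
-- ===== Notes on version B (the rewrite author's own statement) =====
-- stated objective: idiomatic
-- what changed: Replaces A's single branch-and-accumulate loop with four independent str.count scans combined arithmetically: no accumulator, no per-character branching, a different traversal shape (four staged passes).
import Mathlib
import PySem

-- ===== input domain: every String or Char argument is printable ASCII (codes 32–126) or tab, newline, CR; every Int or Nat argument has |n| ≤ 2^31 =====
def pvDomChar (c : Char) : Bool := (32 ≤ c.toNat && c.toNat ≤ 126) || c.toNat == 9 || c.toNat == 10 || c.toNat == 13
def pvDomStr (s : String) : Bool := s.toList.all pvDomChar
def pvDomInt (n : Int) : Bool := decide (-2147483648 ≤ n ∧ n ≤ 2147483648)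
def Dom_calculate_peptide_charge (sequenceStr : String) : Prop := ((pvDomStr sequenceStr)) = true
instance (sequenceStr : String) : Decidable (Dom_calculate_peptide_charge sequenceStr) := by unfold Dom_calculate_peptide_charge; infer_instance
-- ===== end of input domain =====

-- B replaces A's branch-and-accumulate loop with four independent str.count scans (idiomatic one-liner, same O(n) cost).

-- ===== PORT A =====
-- Port of A: fold over the characters, branching per character, running accumulator.
def calculate_peptide_charge (sequenceStr : String) : Int :=
  sequenceStr.toList.foldl
    (fun sequenceChargeInt aa =>
      if aa = 'R' ∨ aa = 'K' then sequenceChargeInt + 1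
      else if aa = 'D' ∨ aa = 'E' then sequenceChargeInt - 1
      else sequenceChargeInt) 0

-- ===== PORT B =====
-- Port of B: four independent str.count scans, combined arithmetically.
def calculate_peptide_charge_alt (sequenceStr : String) : Int :=
  (PySem.Str.count sequenceStr "R" : Int) + (PySem.Str.count sequenceStr "K" : Int)
    - (PySem.Str.count sequenceStr "D" : Int) - (PySem.Str.count sequenceStr "E" : Int)

-- ===== PRECONDITION & SPEC =====
def Spec_calculate_peptide_charge (sequenceStr : String) (out : Int) : Prop := out = calculate_peptide_charge_alt sequenceStr
instance (sequenceStr : String) (out : Int) : Decidable (Spec_calculate_peptide_charge sequenceStr out) := by unfold Spec_calculate_peptide_charge; infer_instance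

-- ===== CLAIM (what is proved, stated in full; the proofs are below) =====
def Claim_equal_calculate_peptide_charge : Prop := ∀ (sequenceStr : String), Dom_calculate_peptide_charge sequenceStr → Spec_calculate_peptide_charge sequenceStr (calculate_peptide_charge sequenceStr)

-- ===== LEMMAS AND PROOFS =====

-- str.count with a single-character needle is the list count of that character.
lemma count_go_single (c : Char) : ∀ (l : List Char) (fuel acc : Nat), l.length ≤ fuel →
    PySem.Chars.count.go [c] fuel l acc = acc + l.count c := by
  intro l
  induction l with
  | nil => intro fuel acc _; cases fuel <;> simp [PySem.Chars.count.go]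
  | cons h t ih =>
    intro fuel acc hle
    cases fuel with
    | zero => simp at hle
    | succ f =>
      have ht : t.length ≤ f := by simpa using hle
      by_cases hc : c = h
      · subst hc
        simp only [PySem.Chars.count.go, List.isPrefixOf, List.count_cons]
        simp [ih f (acc + 1) ht]
        omega
      · simp only [PySem.Chars.count.go, List.isPrefixOf, List.count_cons]
        simp [Ne.symm hc, hc, ih f acc ht]

lemma chars_count_single (l : List Char) (c : Char) : PySem.Chars.count l [c] = l.count c := by
  simp [PySem.Chars.count, count_go_single c l l.length 0 le_rfl]

-- A's fold computes the signed combination of the four character counts.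
lemma foldl_charge_eq (l : List Char) (acc : Int) :
    l.foldl
      (fun sequenceChargeInt aa =>
        if aa = 'R' ∨ aa = 'K' then sequenceChargeInt + 1
        else if aa = 'D' ∨ aa = 'E' then sequenceChargeInt - 1
        else sequenceChargeInt) acc
      = acc + l.count 'R' + l.count 'K' - l.count 'D' - l.count 'E' := by
  induction l generalizing acc with
  | nil => simp
  | cons x xs ih =>
    simp only [List.foldl_cons, ih, List.count_cons]
    by_cases hR : x = 'R' <;> by_cases hK : x = 'K' <;>
      by_cases hD : x = 'D' <;> by_cases hE : x = 'E' <;>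
      simp_all <;> omega

-- ===== VERDICT (by name: the statement is the Claim_ definition above) =====
theorem calculate_peptide_charge_spec : Claim_equal_calculate_peptide_charge := by
  intro s _
  unfold Spec_calculate_peptide_charge calculate_peptide_charge calculate_peptide_charge_alt
  simp [PySem.Str.count, chars_count_single, foldl_charge_eq]
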